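-- pv_equiv track=rewrite | github.com/neimasilk/volcarch-repo | experiments/E027_ml_substrate_detection/00_prepare_features.py | count_consonant_clusters
-- ===== SOURCE A (Python) =====
-- VOWELS = set("aeiouəɛɨɔæøüöäåãẽĩõũâêîôûàèìòùáéíóú")
--
-- def count_consonant_clusters(form):
--     """Count CC+ sequences (consecutive consonants)."""
--     fl = form.lower()
--     count = 0
--     in_cluster = False
--     consec = 0
--     for c in fl:
--         if c not in VOWELS and c.isalpha():
--             consec += 1
--             if consec == 2 and not in_cluster:
--                 count += 1
--                 in_cluster = True
--         else:
--             consec = 0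
--             in_cluster = False
--     return count
-- ===== SOURCE B (Python) =====
-- VOWELS = set("aeiouəɛɨɔæøüöäåãẽĩõũâêîôûàèìòùáéíóú")
--
-- def count_consonant_clusters(form):
--     """Count CC+ sequences (consecutive consonants) by scanning maximal runs."""
--     fl = form.lower()
--     n = len(fl)
--     count = 0
--     i = 0
--     while i < n:
--         if fl[i] not in VOWELS and fl[i].isalpha():
--             j = i + 1
--             while j < n and fl[j] not in VOWELS and fl[j].isalpha():
--                 j += 1
--             if j - i >= 2:
--                 count += 1
--             i = j
--         else:
--             i += 1
--     return count
-- ===== Notes on version B (the rewrite author's own statement) =====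
-- stated objective: alternative
-- what changed: Replaces A's per-character state machine (count/in_cluster/consec flags) with a two-pointer scan that jumps over each maximal consonant run and counts runs of length >= 2.
import Mathlib
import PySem

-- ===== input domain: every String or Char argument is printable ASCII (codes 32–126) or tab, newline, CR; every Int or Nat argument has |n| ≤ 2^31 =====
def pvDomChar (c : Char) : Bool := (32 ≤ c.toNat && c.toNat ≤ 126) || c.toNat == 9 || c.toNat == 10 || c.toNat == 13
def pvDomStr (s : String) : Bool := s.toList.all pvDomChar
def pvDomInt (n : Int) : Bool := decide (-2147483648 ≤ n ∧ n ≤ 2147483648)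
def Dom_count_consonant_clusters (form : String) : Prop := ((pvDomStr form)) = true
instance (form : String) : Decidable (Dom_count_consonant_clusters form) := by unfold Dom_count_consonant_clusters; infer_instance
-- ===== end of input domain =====

-- B replaces A's count/in_cluster/consec state machine with a two-pointer scan over
-- maximal consonant runs, counting runs of length >= 2 (same cost, plainer structure).

-- VOWELS = set("aeiouəɛɨɔæøüöäåãẽĩõũâêîôûàèìòùáéíóú")
def pvVowels : List Char := "aeiouəɛɨɔæøüöäåãẽĩõũâêîôûàèìòùáéíóú".toList

-- the shared per-character test: c not in VOWELS and c.isalpha()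
def pvIsCons (c : Char) : Bool := !(pvVowels.contains c) && PySem.Chars.isalpha c

-- ===== PORT A =====
-- A's loop body, step for step: consec += 1; if consec == 2 and not in_cluster …
def pvStepA (s : Int × Bool × Int) (c : Char) : Int × Bool × Int :=
  let (count, in_cluster, consec) := s
  if pvIsCons c then
    let consec := consec + 1
    if consec == 2 && !in_cluster then (count + 1, true, consec)
    else (count, in_cluster, consec)
  else (count, false, 0)

def count_consonant_clusters (form : String) : Int :=
  ((PySem.Str.lower form).toList.foldl pvStepA (0, false, 0)).1

-- ===== PORT B =====
-- B's outer while loop: at a consonant, scan its maximal run (inner while = takeWhile/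
-- dropWhile), count it iff its length is >= 2, and resume after the run.
def pvScanB (l : List Char) : Int :=
  match l with
  | [] => 0
  | c :: cs =>
    if pvIsCons c then
      (if (cs.takeWhile pvIsCons).length + 1 ≥ 2 then 1 else 0)
        + pvScanB (cs.dropWhile pvIsCons)
    else pvScanB cs
termination_by l.length
decreasing_by
  · exact Nat.lt_succ_of_le (cs.length_dropWhile_le pvIsCons)
  · exact Nat.lt_succ_self _

def count_consonant_clusters_alt (form : String) : Int :=
  pvScanB (PySem.Str.lower form).toList

-- ===== PRECONDITION & SPEC =====
def Spec_count_consonant_clusters (form : String) (out : Int) : Prop := out = count_consonant_clusters_alt form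
instance (form : String) (out : Int) : Decidable (Spec_count_consonant_clusters form out) := by unfold Spec_count_consonant_clusters; infer_instance

-- ===== CLAIM (what is proved, stated in full; the proofs are below) =====
def Claim_equal_count_consonant_clusters : Prop := ∀ (form : String), Dom_count_consonant_clusters form → Spec_count_consonant_clusters form (count_consonant_clusters form)

-- ===== LEMMAS AND PROOFS =====

-- A's step on a consonant, in terms of the number k ≥ 1 of consonants seen so far
lemma pvStepCons (c : Char) (hc : pvIsCons c = true) (count : Int) (k : Nat) (hk : 1 ≤ k) :
    pvStepA (count + (if 2 ≤ k then 1 else 0), decide (2 ≤ k), (k : Int)) c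
      = (count + (if 2 ≤ k + 1 then 1 else 0), decide (2 ≤ k + 1), ((k + 1 : Nat) : Int)) := by
  rcases eq_or_lt_of_le hk with h1 | h2
  · subst h1
    simp [pvStepA, hc]
  · have hk2 : 2 ≤ k := h2
    have hne : ((k : Int) + 1 == 2) = false := by
      simp only [beq_eq_false_iff_ne, ne_eq]
      omega
    have h1 : 2 ≤ k + 1 := by omega
    simp [pvStepA, hc, hne, hk2, h1]

-- Folding A's step over a run of consonants, starting inside the run with k ≥ 1 seen
lemma pvRunFold (run : List Char) (h : ∀ c ∈ run, pvIsCons c = true)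
    (count : Int) (k : Nat) (hk : 1 ≤ k) :
    run.foldl pvStepA (count + (if 2 ≤ k then 1 else 0), decide (2 ≤ k), (k : Int))
      = (count + (if 2 ≤ run.length + k then 1 else 0), decide (2 ≤ run.length + k),
          ((run.length + k : Nat) : Int)) := by
  induction run generalizing k with
  | nil => simp
  | cons c cs ih =>
    have hc : pvIsCons c = true := h c (by simp)
    have hcs : ∀ x ∈ cs, pvIsCons x = true := fun x hx => h x (by simp [hx])
    rw [List.foldl_cons, pvStepCons c hc count k hk, ih hcs (k + 1) (by omega)]
    have hkk : cs.length + (k + 1) = (c :: cs).length + k := by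
      simp [List.length_cons]; omega
    rw [hkk]

-- after dropWhile, the head (if any) fails the predicate
lemma pvHeadDrop {p : Char → Bool} {l : List Char} {d : Char} {ds : List Char}
    (h : l.dropWhile p = d :: ds) : p d = false := by
  induction l with
  | nil => simp [List.dropWhile] at h
  | cons a as ih =>
    by_cases hpa : p a = true
    · rw [List.dropWhile_cons_of_pos hpa] at h; exact ih h
    · rw [List.dropWhile_cons_of_neg hpa] at h
      cases h
      simpa using hpa
-- main invariant: from a clean state, A's fold counts what B's run scan counts
lemma pvMain : ∀ (n : Nat) (l : List Char), l.length ≤ n → ∀ count : Int,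
    (l.foldl pvStepA (count, false, 0)).1 = count + pvScanB l := by
  intro n
  induction n with
  | zero =>
    intro l hl count
    have : l = [] := List.eq_nil_of_length_eq_zero (by omega)
    simp [this, pvScanB]
  | succ n ih =>
    intro l hl count
    cases l with
    | nil => simp [pvScanB]
    | cons c cs =>
      by_cases hc : pvIsCons c = true
      · have hsplit := List.takeWhile_append_dropWhile (p := pvIsCons) (l := cs)
        have htk : ∀ x ∈ cs.takeWhile pvIsCons, pvIsCons x = true :=
          fun x hx => List.mem_takeWhile_imp hx
        have hlen : (cs.takeWhile pvIsCons).length + (cs.dropWhile pvIsCons).length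
            = cs.length := by
          rw [← List.length_append, hsplit]
        have stepc : pvStepA (count, false, 0) c
            = (count + (if 2 ≤ (1:Nat) then 1 else 0), decide (2 ≤ (1:Nat)), ((1:Nat) : Int)) := by
          simp [pvStepA, hc]
        have hfold : ((c :: cs).foldl pvStepA (count, false, 0))
            = ((cs.dropWhile pvIsCons).foldl pvStepA
                (count + (if 2 ≤ (cs.takeWhile pvIsCons).length + 1 then 1 else 0),
                 decide (2 ≤ (cs.takeWhile pvIsCons).length + 1),
                 (((cs.takeWhile pvIsCons).length + 1 : Nat) : Int))) := by
          conv_lhs => rw [show c :: cs = c :: (cs.takeWhile pvIsCons ++ cs.dropWhile pvIsCons) by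
            rw [hsplit]]
          rw [List.foldl_cons, stepc, List.foldl_append,
            pvRunFold (cs.takeWhile pvIsCons) htk count 1 (le_refl 1)]
        have hB : pvScanB (c :: cs) = (if 2 ≤ (cs.takeWhile pvIsCons).length + 1 then 1 else 0)
            + pvScanB (cs.dropWhile pvIsCons) := by
          rw [pvScanB]
          simp only [hc, if_true, ge_iff_le]
        rw [hfold, hB]
        cases hd : cs.dropWhile pvIsCons with
        | nil => simp [pvScanB]
        | cons d ds =>
          have hdc : pvIsCons d = false := pvHeadDrop hd
          have stepd : ∀ s : Int × Bool × Int, pvStepA s d = (s.1, false, 0) := by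
            intro s
            obtain ⟨a, b, e⟩ := s
            simp [pvStepA, hdc]
          rw [List.foldl_cons, stepd]
          dsimp only
          have hds : ds.length ≤ n := by
            have hle : (cs.dropWhile pvIsCons).length ≤ cs.length :=
              cs.length_dropWhile_le pvIsCons
            rw [hd] at hle
            simp only [List.length_cons] at hl hle
            omega
          have hone : pvScanB (d :: ds) = pvScanB ds := by
            rw [pvScanB]; simp [hdc]
          rw [ih ds hds, hone]
          ring
      · have hcb : pvIsCons c = false := by simpa using hc
        have step0 : pvStepA (count, false, 0) c = (count, false, 0) := by
          simp [pvStepA, hcb]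
        rw [List.foldl_cons, step0, ih cs (by simp only [List.length_cons] at hl; omega),
          show pvScanB (c :: cs) = pvScanB cs by rw [pvScanB]; simp [hcb]]

-- ===== VERDICT (by name: the statement is the Claim_ definition above) =====
theorem count_consonant_clusters_spec : Claim_equal_count_consonant_clusters := by
  intro form _
  unfold Spec_count_consonant_clusters count_consonant_clusters count_consonant_clusters_alt
  have := pvMain (PySem.Str.lower form).toList.length (PySem.Str.lower form).toList (le_refl _) 0
  simpa using this
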